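-- pv_equiv track=rewrite | github.com/JustLeah/CM1103 | Week 5/Assessment/c1426527.py | doomsday
-- ===== SOURCE A (Python) =====
-- def doomsday(y):
--     """
--     >>> doomsday(2012)
--     3
--     >>> doomsday(1899)
--     2
--     >>> doomsday(1923)
--     3
--     >>> doomsday(10000)
--     -1
--     >>> doomsday(1756)
--     -1
--     >>> type(doomsday(2010))
--     <class 'int'>
--     """
--     #Make sure that the year we are given is between the range that we need
--     if y >= 1800 and y < 2200:
--         if y < 1900:
--             x = 5
--         elif y < 2000:
--             x = 3
--         elif y < 2100:
--             x = 2
--         elif y < 2200: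
--             x = 0
--     #Define some variables that will be used later
--     #Convert the year to a string so that we can slice it
--     #Reconvert it back to an int for processing it later
--         w = int(str(y)[2:])
--         b = w % 12
--         a = w // 12
--         c = b // 4
--         d = (a + b + c) % 7
--     #Create a loop that adds one to the x value whilst subracting 1 from d
--     #If x equals 6 then subtract 1 from d and set x = 0
--         while d > 0:
--             if x == 6:
--                 d = d - 1
--                 x = 0
--             else:
--                 d = d - 1
--                 x = x + 1
--         return x
--     #If outside the year range then just return -1
--     else:
--         return -1
-- ===== SOURCE B (Python) =====
-- def doomsday(y):
--     if 1800 <= y < 2200: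
--         w = y % 100
--         return (5 * (y // 100 % 4) + 2 + w // 12 + w % 12 + w % 12 // 4) % 7
--     return -1
-- ===== Notes on version B (the rewrite author's own statement) =====
-- stated objective: simpler
-- what changed: Replaces the four-branch century table, the string-slice extraction of the last two digits, and the counting loop with a single branch-free modular-arithmetic expression using the closed-form Gregorian century anchor and the year's remainder mod one hundred.
import Mathlib
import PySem

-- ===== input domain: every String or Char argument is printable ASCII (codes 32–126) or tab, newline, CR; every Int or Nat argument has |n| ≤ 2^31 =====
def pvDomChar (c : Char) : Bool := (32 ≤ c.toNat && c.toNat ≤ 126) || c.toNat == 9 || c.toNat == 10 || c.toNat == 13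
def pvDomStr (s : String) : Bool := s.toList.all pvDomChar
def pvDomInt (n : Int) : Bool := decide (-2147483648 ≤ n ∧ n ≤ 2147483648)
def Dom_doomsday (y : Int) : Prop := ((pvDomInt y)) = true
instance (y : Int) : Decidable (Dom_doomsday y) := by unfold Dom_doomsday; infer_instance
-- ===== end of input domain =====

-- B computes the same doomsday weekday with one branch-free modular-arithmetic expression (closed-form Gregorian century anchor, year mod 100) instead of A's century table, string slicing and counting loop; objective: simpler.


-- ===== PORT A =====
-- loop of A: while d > 0: decrement d; x := 0 if x = 6 else x+1 (runs max(d,0) times)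
def doomsdayLoop : Nat → Int → Int
  | 0, x => x
  | n+1, x => doomsdayLoop n (if x = 6 then 0 else x + 1)

def doomsday (y : Int) : Int :=
  if y ≥ 1800 ∧ y < 2200 then
    let x : Int := if y < 1900 then 5 else if y < 2000 then 3 else if y < 2100 then 2 else 0
    -- w = int(str(y)[2:]); the parse never fails on 1800 ≤ y < 2200, the getD 0 is unreachable
    let w : Int := (PySem.Int.ofStr? (PySem.Str.slice (PySem.Int.toStr y) (some 2) none)).getD 0
    let b := PySem.Int.mod w 12
    let a := PySem.Int.floordiv w 12
    let c := PySem.Int.floordiv b 4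
    let d := PySem.Int.mod (a + b + c) 7
    doomsdayLoop d.toNat x
  else -1

-- ===== PORT B =====
def doomsday_alt (y : Int) : Int :=
  if 1800 ≤ y ∧ y < 2200 then
    let w := PySem.Int.mod y 100
    PySem.Int.mod (5 * (PySem.Int.mod (PySem.Int.floordiv y 100) 4) + 2
      + PySem.Int.floordiv w 12 + PySem.Int.mod w 12 + PySem.Int.floordiv (PySem.Int.mod w 12) 4) 7
  else -1

-- ===== PRECONDITION & SPEC =====
def Spec_doomsday (y : Int) (out : Int) : Prop := out = doomsday_alt y
instance (y : Int) (out : Int) : Decidable (Spec_doomsday y out) := by unfold Spec_doomsday; infer_instance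

-- ===== CLAIM (what is proved, stated in full; the proofs are below) =====
def Claim_equal_doomsday : Prop := ∀ (y : Int), Dom_doomsday y → Spec_doomsday y (doomsday y)

-- ===== LEMMAS AND PROOFS =====

-- ===== VERDICT (by name: the statement is the Claim_ definition above) =====
-- finite check over the 400 in-range years
set_option maxRecDepth 100000 in
set_option maxHeartbeats 1000000 in
lemma doomsday_range (n : Fin 400) : doomsday (1800 + (n : Int)) = doomsday_alt (1800 + (n : Int)) := by
  revert n; decide

theorem doomsday_spec : Claim_equal_doomsday := by
  intro y _
  unfold Spec_doomsday
  by_cases h : 1800 ≤ y ∧ y < 2200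
  · have hn : ∃ n : Fin 400, y = 1800 + (n : Int) := by
      refine ⟨⟨(y - 1800).toNat, by omega⟩, by simp; omega⟩
    obtain ⟨n, rfl⟩ := hn
    exact doomsday_range n
  · unfold doomsday doomsday_alt
    rw [if_neg (by omega), if_neg (by omega)]
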